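-- pv_equiv track=rewrite | github.com/Mtrya/astro-reason | solvers/revisit_constellation/rogers_mmrt_mart_binary_scheduler/src/design_models.py | _uncovered_runs
-- ===== SOURCE A (Python) =====
-- def _uncovered_runs(timeline: tuple[bool, ...]) -> tuple[int, ...]:
--     runs: list[int] = []
--     current = 0
--     for covered in timeline:
--         if covered:
--             if current:
--                 runs.append(current)
--                 current = 0
--         else:
--             current += 1
--     if current:
--         runs.append(current)
--     return tuple(runs)
-- ===== SOURCE B (Python) =====
-- def _uncovered_runs(timeline: tuple[bool, ...]) -> tuple[int, ...]:
--     res: list[int] = []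
--     n = len(timeline)
--     i = 0
--     while i < n:
--         v = timeline[i]
--         j = i + 1
--         while j < n and timeline[j] == v:
--             j += 1
--         if not v:
--             res.append(j - i)
--         i = j
--     return tuple(res)
-- ===== Notes on version B (the rewrite author's own statement) =====
-- stated objective: alternative
-- what changed: Replaced the counter state machine with the end-of-loop flush by a two-pointer run-splitting scan: for each maximal run, advance a second index to its end, emit its length if the run is of False, and jump to the run's end.
import Mathlib
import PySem

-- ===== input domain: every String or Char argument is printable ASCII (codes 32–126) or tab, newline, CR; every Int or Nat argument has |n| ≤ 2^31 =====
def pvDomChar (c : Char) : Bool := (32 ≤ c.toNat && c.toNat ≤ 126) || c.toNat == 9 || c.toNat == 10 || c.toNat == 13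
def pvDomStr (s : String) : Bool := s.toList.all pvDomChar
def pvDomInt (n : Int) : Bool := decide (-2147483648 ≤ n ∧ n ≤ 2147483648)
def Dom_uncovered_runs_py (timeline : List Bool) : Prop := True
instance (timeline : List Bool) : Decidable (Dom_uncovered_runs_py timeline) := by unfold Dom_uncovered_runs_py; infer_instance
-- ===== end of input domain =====

-- B replaces A's counter state machine (with its end-of-loop flush) by a run-splitting scan
-- over the remaining suffix; objective: alternative (same value, same O(n) cost).

-- ===== PORT A =====
-- loop body of A's for-loop (state: (runs, current))
def uncoveredStep (st : List Int × Int) (covered : Bool) : List Int × Int :=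
  if covered then (if st.2 ≠ 0 then (st.1 ++ [st.2], 0) else st)
  else (st.1, st.2 + 1)

def uncovered_runs_py (timeline : List Bool) : List Int :=
  let s := timeline.foldl uncoveredStep ([], 0)
  if s.2 ≠ 0 then s.1 ++ [s.2] else s.1

-- ===== PORT B =====
-- Port of B's two-pointer scan in list form: B's pair (i, j) is represented by the remaining
-- suffix at i; the inner while loop advancing j becomes runLen (so k = j - i = 1 + runLen v t),
-- and 'i = j' becomes dropping k elements. Exact in value on every input.
def runLen (v : Bool) : List Bool → Nat
  | [] => 0
  | b :: t => if b = v then runLen v t + 1 else 0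

def uncovered_runs_py_alt : List Bool → List Int
  | [] => []
  | v :: t =>
    let k := 1 + runLen v t
    (if v = false then [(k : Int)] else []) ++ uncovered_runs_py_alt ((v :: t).drop k)
termination_by l => l.length
decreasing_by simp [List.length_drop] <;> omega

-- ===== PRECONDITION & SPEC =====
def Spec_uncovered_runs_py (timeline : List Bool) (out : List Int) : Prop := out = uncovered_runs_py_alt timeline
instance (timeline : List Bool) (out : List Int) : Decidable (Spec_uncovered_runs_py timeline out) := by unfold Spec_uncovered_runs_py; infer_instance

-- ===== CLAIM (what is proved, stated in full; the proofs are below) =====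
def Claim_equal_uncovered_runs_py : Prop := ∀ (timeline : List Bool), Dom_uncovered_runs_py timeline → Spec_uncovered_runs_py timeline (uncovered_runs_py timeline)

-- ===== LEMMAS AND PROOFS =====

-- A's final flush
def flushA (s : List Int × Int) : List Int := if s.2 ≠ 0 then s.1 ++ [s.2] else s.1

-- abstract description of A's loop with a pending count c, final flush included
def runsAux (c : Nat) : List Bool → List Int
  | [] => if c ≠ 0 then [(c : Int)] else []
  | true :: t => (if c ≠ 0 then [(c : Int)] else []) ++ runsAux 0 t
  | false :: t => runsAux (c + 1) t

theorem flushA_foldl (l : List Bool) : ∀ (runs : List Int) (c : Nat),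
    flushA (l.foldl uncoveredStep (runs, (c : Int))) = runs ++ runsAux c l := by
  induction l with
  | nil => intro runs c; cases c <;> simp [flushA, runsAux] <;> omega
  | cons b t ih =>
    intro runs c
    cases b with
    | false =>
      rw [List.foldl_cons,
        show uncoveredStep (runs, (c : Int)) false = (runs, ((c + 1 : Nat) : Int)) from by
          simp [uncoveredStep],
        ih runs (c + 1)]
      rfl
    | true =>
      by_cases h : c = 0
      · subst h
        rw [List.foldl_cons,
          show uncoveredStep (runs, ((0 : Nat) : Int)) true = (runs, ((0 : Nat) : Int)) from by
            simp [uncoveredStep],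
          ih runs 0]
        simp [runsAux]
      · rw [List.foldl_cons,
          show uncoveredStep (runs, (c : Int)) true = (runs ++ [(c : Int)], ((0 : Nat) : Int)) from by
            simp [uncoveredStep, h],
          ih (runs ++ [(c : Int)]) 0]
        simp [runsAux, h]

theorem alt_nil : uncovered_runs_py_alt [] = [] := by
  rw [uncovered_runs_py_alt.eq_def]

theorem alt_cons (v : Bool) (t : List Bool) :
    uncovered_runs_py_alt (v :: t) =
      (if v = false then [((1 + runLen v t : Nat) : Int)] else []) ++
        uncovered_runs_py_alt ((v :: t).drop (1 + runLen v t)) := by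
  rw [uncovered_runs_py_alt.eq_def]

theorem alt_true (t : List Bool) :
    uncovered_runs_py_alt (true :: t) = uncovered_runs_py_alt t := by
  cases t with
  | nil => rw [alt_cons]; simp [runLen, alt_nil]
  | cons b t' =>
    cases b with
    | false => rw [alt_cons]; simp [runLen]
    | true =>
      rw [alt_cons, alt_cons]
      have hr : runLen true (true :: t') = runLen true t' + 1 := by simp [runLen]
      rw [hr, show 1 + (runLen true t' + 1) = (1 + runLen true t') + 1 from by omega]
      simp only [List.drop_succ_cons]
      simp

theorem runLen_replicate (m : Nat) (t : List Bool) :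
    runLen false (List.replicate m false ++ t) = m + runLen false t := by
  induction m with
  | zero => simp
  | succ n ih => simp [List.replicate_succ, runLen, ih] <;> omega

theorem runsAux_eq_alt (l : List Bool) : ∀ (c : Nat),
    runsAux c l = uncovered_runs_py_alt (List.replicate c false ++ l) := by
  induction l with
  | nil =>
    intro c
    cases c with
    | zero => simp [runsAux, alt_nil]
    | succ n =>
      simp only [List.append_nil, List.replicate_succ]
      rw [alt_cons]
      have h1 : runLen false (List.replicate n false) = n := by
        simpa [runLen] using runLen_replicate n []
      rw [h1]
      have h2 : (false :: List.replicate n false).drop (1 + n) = ([] : List Bool) := by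
        apply List.drop_eq_nil_of_le
        simp <;> omega
      rw [h2, alt_nil]
      simp [runsAux] <;> omega
  | cons b t ih =>
    intro c
    have ih0 : runsAux 0 t = uncovered_runs_py_alt t := by simpa using ih 0
    cases b with
    | false =>
      simp only [runsAux]
      rw [ih (c + 1),
        show List.replicate (c + 1) false ++ t = List.replicate c false ++ false :: t from by
          rw [List.replicate_succ'] ; simp]
    | true =>
      by_cases h : c = 0
      · subst h
        simp only [runsAux, List.replicate, List.nil_append]
        rw [alt_true, ih0]
        simp
      · obtain ⟨m, rfl⟩ := Nat.exists_eq_succ_of_ne_zero h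
        simp only [runsAux]
        rw [show List.replicate (m + 1) false ++ true :: t
              = false :: (List.replicate m false ++ true :: t) from by
            rw [List.replicate_succ] ; simp]
        rw [alt_cons]
        have h1 : runLen false (List.replicate m false ++ true :: t) = m := by
          simpa [runLen] using runLen_replicate m (true :: t)
        rw [h1]
        have h2 : (false :: (List.replicate m false ++ true :: t)).drop (1 + m) = true :: t := by
          rw [show 1 + m = m + 1 from by omega, List.drop_succ_cons]
          simpa using List.drop_left (List.replicate m false) (true :: t)
        rw [h2, alt_true, ih0]
        simp <;> omega

theorem py_eq_alt (l : List Bool) : uncovered_runs_py l = uncovered_runs_py_alt l := by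
  have h0 : uncovered_runs_py l = flushA (l.foldl uncoveredStep ([], ((0 : Nat) : Int))) := rfl
  rw [h0, flushA_foldl l [] 0]
  simpa using runsAux_eq_alt l 0

-- ===== VERDICT (by name: the statement is the Claim_ definition above) =====
theorem uncovered_runs_py_spec : Claim_equal_uncovered_runs_py := by
  intro l _
  unfold Spec_uncovered_runs_py
  exact py_eq_alt l
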